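-- pv_equiv track=rewrite | github.com/hivdb-lanl/FilteredForests | hxb2.py | hxb2_translate
-- ===== SOURCE A (Python) =====
-- def hxb2_translate(hxb2_seq):
--     ''' return an array of strings such that xlate[n] is the HXB2 name for the n'th site in the alignment
--     here, n is zero-based position, but the HXB2 position is one based.  To get a sense of what this
--     looks like: HXB2 = "mrv-k--eky..." -> xlate = [001,002,003,003a,004,004a,004b,005,006,007]"
--     '''
--     abc="abcdefghijklmnopqrstuvwxyzABCDEFGHIJKLMNOPQRSTUVWXYZ"
--     xlate = []
--     n=0
--     nabc=0
--     for c in hxb2_seq: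
--         if c != '-':
--             n += 1
--             nabc = 0
--             xlate.append( "%03d" % (n,) )
--         else:
--             xlate.append( "%03d%1s" % (n,abc[nabc]) )
--             nabc += 1
--     return xlate
-- ===== SOURCE B (Python) =====
-- def hxb2_translate(hxb2_seq):
--     '''Run-based rewrite: split the sequence into maximal runs of non-gaps / gaps
--     and emit each run's names in one batch (same output as the per-char version).'''
--     abc = "abcdefghijklmnopqrstuvwxyzABCDEFGHIJKLMNOPQRSTUVWXYZ"
--     xlate = []
--     n = 0
--     i = 0
--     L = len(hxb2_seq)
--     while i < L:
--         if hxb2_seq[i] != '-':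
--             j = i
--             while j < L and hxb2_seq[j] != '-':
--                 j += 1
--             xlate.extend("%03d" % k for k in range(n + 1, n + 1 + (j - i)))
--             n += j - i
--         else:
--             j = i
--             while j < L and hxb2_seq[j] == '-':
--                 j += 1
--             base = "%03d" % n
--             xlate.extend(base + abc[k] for k in range(j - i))
--         i = j
--     return xlate
-- ===== Notes on version B (the rewrite author's own statement) =====
-- stated objective: alternative
-- what changed: B splits the sequence into maximal runs of gap/non-gap characters and emits each run's names in one batch from the run boundaries, instead of A's per-character loop threading the n/nabc counters.
import Mathlib
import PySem

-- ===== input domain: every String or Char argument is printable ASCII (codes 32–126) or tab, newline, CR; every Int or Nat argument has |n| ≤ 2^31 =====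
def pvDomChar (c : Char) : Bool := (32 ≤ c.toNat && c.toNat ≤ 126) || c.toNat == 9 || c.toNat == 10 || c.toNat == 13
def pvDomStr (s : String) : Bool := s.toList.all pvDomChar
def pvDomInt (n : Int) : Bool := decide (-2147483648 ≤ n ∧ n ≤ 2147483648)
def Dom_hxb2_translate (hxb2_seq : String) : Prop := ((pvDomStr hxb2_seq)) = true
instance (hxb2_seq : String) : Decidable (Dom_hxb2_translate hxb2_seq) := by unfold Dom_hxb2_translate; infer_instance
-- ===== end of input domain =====

-- B rewrites A's per-character loop as a loop over maximal gap / non-gap runs, emitting each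
-- run's site names in one batch; same output, same O(n) cost (objective: alternative).

-- shared formatting helper: Python's "%03d" % n for n ≥ 0 (exact there; n stays ≥ 0 in both programs)
def fmt3 (n : Int) : String :=
  let s := PySem.Int.toChars n
  String.ofList (List.replicate (3 - s.length) '0' ++ s)

def pvAbc : String := "abcdefghijklmnopqrstuvwxyzABCDEFGHIJKLMNOPQRSTUVWXYZ"

-- ===== PORT A =====
-- one step of A's for-loop; state = (xlate, n, nabc).  abc[nabc] would raise IndexError for
-- nabc ≥ 52 (pyGet? = none); the '?' default is reached only outside Pre_ below.
def pvStepA (st : List String × Int × Int) (c : Char) : List String × Int × Int :=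
  let xlate := st.1; let n := st.2.1; let nabc := st.2.2
  if c ≠ '-' then
    (xlate ++ [fmt3 (n + 1)], n + 1, 0)
  else
    (xlate ++ [fmt3 n ++ String.singleton ((PySem.Str.pyGet? pvAbc nabc).getD '?')], n, nabc + 1)

def hxb2_translate (hxb2_seq : String) : List String :=
  (hxb2_seq.toList.foldl pvStepA ([], 0, 0)).1

-- ===== PORT B =====
-- name of the k'th site of a gap run that follows absolute position n (Source B: base + abc[k])
def pvGapName (n : Int) (k : Nat) : String :=
  fmt3 n ++ String.singleton ((PySem.Str.pyGet? pvAbc (k : Int)).getD '?')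

-- termination of the run loop: each iteration drops at least the run's first character
theorem pvDrop_lt (p : Char → Bool) (c : Char) (rest : List Char) (h : p c = true) :
    ((c :: rest).dropWhile p).length < (c :: rest).length := by
  rw [List.dropWhile_cons_of_pos h]
  exact Nat.lt_succ_of_le (List.length_dropWhile_le _ _)

-- Source B's outer while-loop: each iteration consumes one maximal run (the inner while-loop
-- advancing j is the takeWhile/dropWhile split) and extends the output with that run's names.
def pvRunsB : List Char → Int → List String
  | [], _ => []
  | c :: rest, n =>
    if c ≠ '-' then
      ((List.range (((c :: rest).takeWhile (· ≠ '-')).length)).map fun k : Nat => fmt3 (n + 1 + (k : Int))) ++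
        pvRunsB ((c :: rest).dropWhile (· ≠ '-')) (n + ((c :: rest).takeWhile (· ≠ '-')).length)
    else
      ((List.range (((c :: rest).takeWhile (· = '-')).length)).map fun k : Nat => pvGapName n k) ++
        pvRunsB ((c :: rest).dropWhile (· = '-')) n
termination_by l => l.length
decreasing_by
  · exact pvDrop_lt _ c rest (by simp_all)
  · exact pvDrop_lt _ c rest (by simp_all)

def hxb2_translate_alt (hxb2_seq : String) : List String :=
  pvRunsB hxb2_seq.toList 0

-- ===== PRECONDITION & SPEC =====
-- Pre_ excludes inputs containing a run of 53 or more '-' characters, on which the Python A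
-- raises IndexError (abc[nabc] with nabc ≥ 52); B raises the same IndexError there.
def Pre_hxb2_translate (hxb2_seq : String) : Prop :=
  ¬ (List.replicate 53 '-') <:+: hxb2_seq.toList
instance (hxb2_seq : String) : Decidable (Pre_hxb2_translate hxb2_seq) := by
  unfold Pre_hxb2_translate; infer_instance

def pvWitness_hxb2_translate : String := "mrv-k--eky"

def Spec_hxb2_translate (hxb2_seq : String) (out : List String) : Prop := out = hxb2_translate_alt hxb2_seq
instance (hxb2_seq : String) (out : List String) : Decidable (Spec_hxb2_translate hxb2_seq out) := by unfold Spec_hxb2_translate; infer_instance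

-- ===== CLAIM (what is proved, stated in full; the proofs are below) =====
def Claim_equal_hxb2_translate : Prop := ∀ (hxb2_seq : String), Dom_hxb2_translate hxb2_seq → Pre_hxb2_translate hxb2_seq → Spec_hxb2_translate hxb2_seq (hxb2_translate hxb2_seq)

-- ===== LEMMAS AND PROOFS =====

-- character-level reformulation of A's loop (accumulator removed; nabc as a Nat)
def aGo : List Char → Int → Nat → List String
  | [], _, _ => []
  | c :: cs, n, nabc =>
    if c ≠ '-' then fmt3 (n + 1) :: aGo cs (n + 1) 0
    else pvGapName n nabc :: aGo cs n (nabc + 1)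

theorem aGo_nil (n : Int) (m : Nat) : aGo [] n m = [] := rfl

theorem aGo_cons_gap (cs : List Char) (n : Int) (m : Nat) :
    aGo ('-' :: cs) n m = pvGapName n m :: aGo cs n (m + 1) := by
  simp [aGo]

theorem aGo_cons_nongap {c : Char} (hc : c ≠ '-') (cs : List Char) (n : Int) (m : Nat) :
    aGo (c :: cs) n m = fmt3 (n + 1) :: aGo cs (n + 1) 0 := by
  simp [aGo, hc]

theorem map_range_succ_shift {α : Type} (f : Nat → α) (len : Nat) :
    (List.range (len + 1)).map f = f 0 :: (List.range len).map (fun k => f (k + 1)) := by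
  rw [List.range_succ_eq_map, List.map_cons, List.map_map]; rfl

theorem foldl_pvStepA (l : List Char) (acc : List String) (n : Int) (m : Nat) :
    (l.foldl pvStepA (acc, n, (m : Int))).1 = acc ++ aGo l n m := by
  induction l generalizing acc n m with
  | nil => simp [aGo_nil]
  | cons c cs ih =>
    by_cases hc : c = '-'
    · subst hc
      rw [aGo_cons_gap]
      have h1 : pvStepA (acc, n, (m : Int)) '-'
          = (acc ++ [pvGapName n m], n, ((m + 1 : Nat) : Int)) := by
        simp only [pvStepA, pvGapName]
        rw [if_neg (by simp)]
        simp only [Prod.mk.injEq]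
        refine ⟨by trivial, by trivial, by push_cast; ring⟩
      rw [List.foldl_cons, h1, ih]
      simp
    · rw [aGo_cons_nongap hc]
      have h1 : pvStepA (acc, n, (m : Int)) c
          = (acc ++ [fmt3 (n + 1)], n + 1, ((0 : Nat) : Int)) := by
        simp only [pvStepA]
        rw [if_pos (by simp [hc])]
        simp
      rw [List.foldl_cons, h1, ih]
      simp

-- nabc is irrelevant when the list does not start with a gap
theorem aGo_reset (d : List Char) (n : Int) (m m' : Nat)
    (h : ∀ c, d.head? = some c → c ≠ '-') : aGo d n m = aGo d n m' := by
  cases d with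
  | nil => rfl
  | cons c cs =>
    have hc : c ≠ '-' := h c rfl
    rw [aGo_cons_nongap hc, aGo_cons_nongap hc]

theorem head?_dropWhile_ne (p : Char → Bool) (l : List Char) :
    ∀ c, ((l.dropWhile p).head? = some c) → p c = false := by
  induction l with
  | nil => intro c h; simp at h
  | cons a as ih =>
    intro c h
    by_cases ha : p a
    · exact ih c (by simpa [List.dropWhile, ha] using h)
    · simp [Bool.not_eq_true] at ha
      simp [List.dropWhile, ha] at h
      subst h; exact ha

theorem aGo_gap (l : List Char) (n : Int) (m : Nat) :
    aGo l n m = ((List.range ((l.takeWhile (· = '-')).length)).map fun k : Nat => pvGapName n (m + k)) ++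
      aGo (l.dropWhile (· = '-')) n (m + (l.takeWhile (· = '-')).length) := by
  induction l generalizing m with
  | nil => simp [aGo_nil]
  | cons c cs ih =>
    by_cases hc : c = '-'
    · subst hc
      rw [aGo_cons_gap, List.takeWhile_cons_of_pos (by simp),
        List.dropWhile_cons_of_pos (by simp), ih (m + 1)]
      rw [List.length_cons, map_range_succ_shift]
      rw [List.cons_append, Nat.add_zero]
      have h2 : ∀ k : Nat, pvGapName n (m + (k + 1)) = pvGapName n (m + 1 + k) := by
        intro k; congr 1; omega
      simp only [h2]
      rw [show m + ((List.takeWhile (fun x => decide (x = '-')) cs).length + 1)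
          = m + 1 + (List.takeWhile (fun x => decide (x = '-')) cs).length from by omega]
      simp
    · rw [List.takeWhile_cons_of_neg (by simp [hc]), List.dropWhile_cons_of_neg (by simp [hc])]
      simp

theorem aGo_nongap (l : List Char) (n : Int) :
    aGo l n 0 = ((List.range ((l.takeWhile (· ≠ '-')).length)).map fun k : Nat => fmt3 (n + 1 + (k : Int))) ++
      aGo (l.dropWhile (· ≠ '-')) (n + (l.takeWhile (· ≠ '-')).length) 0 := by
  induction l generalizing n with
  | nil => simp [aGo_nil]
  | cons c cs ih =>
    by_cases hc : c = '-'
    · subst hc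
      rw [List.takeWhile_cons_of_neg (by simp), List.dropWhile_cons_of_neg (by simp)]
      simp
    · rw [aGo_cons_nongap hc, List.takeWhile_cons_of_pos (by simp [hc]),
        List.dropWhile_cons_of_pos (by simp [hc]), ih (n + 1)]
      rw [List.length_cons, map_range_succ_shift, List.cons_append]
      have h2 : ∀ k : Nat, fmt3 (n + 1 + ((k + 1 : Nat) : Int)) = fmt3 (n + 1 + 1 + (k : Int)) := by
        intro k; congr 1; push_cast; ring
      simp only [h2]
      rw [show n + (((List.takeWhile (fun x => decide (x ≠ '-')) cs).length + 1 : Nat) : Int)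
          = n + 1 + ((List.takeWhile (fun x => decide (x ≠ '-')) cs).length : Int) from by push_cast; ring]
      simp

theorem aGo_eq_pvRunsB (l : List Char) (n : Int) : aGo l n 0 = pvRunsB l n := by
  induction hL : l.length using Nat.strong_induction_on generalizing l n with
  | _ L ih =>
  cases l with
  | nil => simp [aGo_nil, pvRunsB]
  | cons c cs =>
    by_cases hc : c = '-'
    · subst hc
      rw [pvRunsB, if_neg (by simp)]
      rw [aGo_gap]
      have hd : ∀ x, ((('-' :: cs).dropWhile (· = '-')).head? = some x) → x ≠ '-' := by
        intro x hx
        have := head?_dropWhile_ne (· = '-') ('-' :: cs) x hx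
        simpa using this
      rw [aGo_reset _ n _ 0 hd]
      have hlen : (('-' :: cs).dropWhile (· = '-')).length < L := by
        subst hL; exact pvDrop_lt _ _ _ (by simp)
      rw [ih _ hlen _ _ rfl]
      simp
    · rw [pvRunsB, if_pos hc]
      rw [aGo_nongap]
      have hlen : ((c :: cs).dropWhile (· ≠ '-')).length < L := by
        subst hL; exact pvDrop_lt _ _ _ (by simp [hc])
      rw [ih _ hlen _ _ rfl]

-- ===== VERDICT (by name: the statement is the Claim_ definition above) =====
theorem hxb2_translate_spec : Claim_equal_hxb2_translate := by
  intro s _ _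
  unfold Spec_hxb2_translate hxb2_translate hxb2_translate_alt
  rw [show ((0:Int)) = ((0:Nat) : Int) from rfl, foldl_pvStepA]
  simpa using aGo_eq_pvRunsB s.toList 0
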